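-- pv_equiv track=rewrite | github.com/Anurag-006/Vnr-Vanguard | app/scraper/utils.py | get_sequence_strings
-- ===== SOURCE A (Python) =====
-- def get_sequence_strings(start_idx, end_idx):
--     """
--     Generates alphanumeric sequences skipping restricted characters.
--     JNTUH/VNR follows a specific encoding after 99:
--     1-99 -> 01, 02... 99
--     100+ -> A0, A1... B0, B1... (skipping I, L, O, S)
--     """
--     valid_chars = "ABCDEFGHJKMNPQRTUVWXYZ"
--     seq = []
--     for i in range(start_idx, end_idx + 1):
--         if i <= 99:
--             # Standard two-digit padding for 01-99
--             seq.append(f"{i:02d}")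
--         else:
--             # Alphanumeric encoding for 100+
--             offset = i - 100
--             char_index = offset // 10
--             digit = offset % 10
--
--             # Prevent index out of bounds if a section is unusually large
--             if char_index < len(valid_chars):
--                 char = valid_chars[char_index]
--                 seq.append(f"{char}{digit}")
--     return seq
-- ===== SOURCE B (Python) =====
-- def get_sequence_strings(start_idx, end_idx):
--     valid_chars = "ABCDEFGHJKMNPQRTUVWXYZ"
--     seq = []
--     # numeric pass: all indices <= 99 in the requested range
--     for i in range(start_idx, min(end_idx, 99) + 1):
--         seq.append(f"{i:02d}")
--     # structural pass: iterate the encoding table instead of decoding each index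
--     for char_index, char in enumerate(valid_chars):
--         for digit in range(10):
--             idx = 100 + char_index * 10 + digit
--             if start_idx <= idx <= end_idx:
--                 seq.append(f"{char}{digit}")
--     return seq
-- ===== Notes on version B (the rewrite author's own statement) =====
-- stated objective: faster
-- what changed: Instead of decoding every index in [start_idx, end_idx] one by one (doing nothing for indices >= 320), B emits the numeric strings for the indices up to 99 and then iterates the fixed 22x10 encoding table (char x digit), keeping each table entry whose global index 100+char_index*10+digit lies in the requested range.
import Mathlib
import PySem

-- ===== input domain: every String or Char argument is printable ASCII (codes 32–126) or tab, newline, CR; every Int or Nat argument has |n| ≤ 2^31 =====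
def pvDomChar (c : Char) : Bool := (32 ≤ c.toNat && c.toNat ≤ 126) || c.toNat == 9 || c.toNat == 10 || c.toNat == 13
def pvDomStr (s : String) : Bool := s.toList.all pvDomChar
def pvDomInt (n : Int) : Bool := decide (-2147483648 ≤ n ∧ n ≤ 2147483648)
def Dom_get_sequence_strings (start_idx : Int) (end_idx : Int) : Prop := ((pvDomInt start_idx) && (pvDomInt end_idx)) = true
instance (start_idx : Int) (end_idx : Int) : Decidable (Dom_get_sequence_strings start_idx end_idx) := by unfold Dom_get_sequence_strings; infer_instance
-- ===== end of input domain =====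

-- B replaces A's single decode-per-index loop by a numeric pass over [start, min(end, 99)] plus a
-- fixed 22×10 pass over the encoding table itself (char × digit) filtered by the requested range.

-- f"{i:02d}": zero-pad to width 2.  Exact for every Int: the only 1-character decimal renderings
-- are those of 0..9 (negative numbers already render with at least 2 characters).
def pvFmt02 (i : Int) : String :=
  if 0 ≤ i ∧ i ≤ 9 then "0" ++ PySem.Int.toStr i else PySem.Int.toStr i

-- ===== PORT A =====
def get_sequence_strings (start_idx : Int) (end_idx : Int) : List String :=
  let valid_chars := "ABCDEFGHJKMNPQRTUVWXYZ"
  (PySem.List.pyRange start_idx (end_idx + 1)).foldl (fun seq i =>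
    if i ≤ 99 then
      seq ++ [pvFmt02 i]
    else
      let offset := i - 100
      let char_index := PySem.Int.floordiv offset 10
      let digit := PySem.Int.mod offset 10
      if char_index < PySem.Str.len valid_chars then
        -- the guard makes the index in range (offset ≥ 0 in this branch), so .getD is exact here
        seq ++ [String.ofList [(PySem.Str.pyGet? valid_chars char_index).getD 'A'] ++ PySem.Int.toStr digit]
      else seq) []

-- ===== PORT B =====
def get_sequence_strings_alt (start_idx : Int) (end_idx : Int) : List String :=
  let valid_chars := "ABCDEFGHJKMNPQRTUVWXYZ"
  let seq := (PySem.List.pyRange start_idx (min end_idx 99 + 1)).foldl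
    (fun seq i => seq ++ [pvFmt02 i]) []
  (PySem.List.enumerate valid_chars.toList 0).foldl (fun seq p =>
    (PySem.List.pyRange 0 10).foldl (fun seq digit =>
      let idx : Int := 100 + p.1 * 10 + digit
      if start_idx ≤ idx ∧ idx ≤ end_idx then seq ++ [String.ofList [p.2] ++ PySem.Int.toStr digit]
      else seq) seq) seq

-- ===== PRECONDITION & SPEC =====
def Spec_get_sequence_strings (start_idx : Int) (end_idx : Int) (out : List String) : Prop := out = get_sequence_strings_alt start_idx end_idx
instance (start_idx : Int) (end_idx : Int) (out : List String) : Decidable (Spec_get_sequence_strings start_idx end_idx out) := by unfold Spec_get_sequence_strings; infer_instance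

-- ===== CLAIM (what is proved, stated in full; the proofs are below) =====
def Claim_equal_get_sequence_strings : Prop := ∀ (start_idx : Int) (end_idx : Int), Dom_get_sequence_strings start_idx end_idx → Spec_get_sequence_strings start_idx end_idx (get_sequence_strings start_idx end_idx)

-- ===== LEMMAS AND PROOFS =====

-- what A appends for one table index i (100 ≤ i < 320)
def pvHigh (i : Int) : List String :=
  [String.ofList [(PySem.Str.pyGet? "ABCDEFGHJKMNPQRTUVWXYZ" (PySem.Int.floordiv (i - 100) 10)).getD 'A']
     ++ PySem.Int.toStr (PySem.Int.mod (i - 100) 10)]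

-- what A appends for one index i of its loop
def pvBodyA (i : Int) : List String :=
  if i ≤ 99 then [pvFmt02 i]
  else if PySem.Int.floordiv (i - 100) 10 < 22 then pvHigh i else []

theorem pvFlatMapSingleton (l : List Int) (f : Int → String) :
    l.flatMap (fun i => [f i]) = l.map f := by
  induction l with
  | nil => rfl
  | cons a t ih => simp [List.flatMap_cons, ih]

theorem pvA_flatMap (s e : Int) :
    get_sequence_strings s e = (PySem.List.pyRange s (e + 1)).flatMap pvBodyA := by
  simp only [get_sequence_strings]
  rw [PySem.List.foldl_congr_mem _ _ (fun acc i => acc ++ pvBodyA i) _ ?_,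
    PySem.List.foldl_append_eq_flatMap, List.nil_append]
  intro acc i _
  simp only [pvBodyA, pvHigh, show PySem.Str.len "ABCDEFGHJKMNPQRTUVWXYZ" = 22 from by decide]
  split_ifs <;> simp

theorem pvB_split (s e : Int) :
    get_sequence_strings_alt s e =
      (PySem.List.pyRange s (min e 99 + 1)).map pvFmt02 ++
        (PySem.List.enumerate "ABCDEFGHJKMNPQRTUVWXYZ".toList 0).flatMap (fun p =>
          (PySem.List.pyRange 0 10).flatMap (fun d =>
            if s ≤ 100 + p.1 * 10 + d ∧ 100 + p.1 * 10 + d ≤ e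
            then [String.ofList [p.2] ++ PySem.Int.toStr d] else [])) := by
  simp only [get_sequence_strings_alt]
  rw [PySem.List.foldl_append_singleton_eq_map, List.nil_append]
  rw [PySem.List.foldl_congr_mem _ _
      (fun acc p => acc ++ (PySem.List.pyRange 0 10).flatMap (fun d =>
        if s ≤ 100 + p.1 * 10 + d ∧ 100 + p.1 * 10 + d ≤ e
        then [String.ofList [p.2] ++ PySem.Int.toStr d] else [])) _ ?_,
    PySem.List.foldl_append_eq_flatMap]
  intro acc p _
  rw [PySem.List.foldl_congr_mem _ _
      (fun acc d => acc ++ (if s ≤ 100 + p.1 * 10 + d ∧ 100 + p.1 * 10 + d ≤ e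
        then [String.ofList [p.2] ++ PySem.Int.toStr d] else [])) _ ?_,
    PySem.List.foldl_append_eq_flatMap]
  intro acc2 d _
  simp only []
  split_ifs <;> simp

-- filtering a range by an interval condition is the clamped range
theorem pvIntervalFilter (g : Int → List String) (lo hi : Int) :
    ∀ (a b : Int),
      (PySem.List.pyRange a b).flatMap (fun i => if lo ≤ i ∧ i < hi then g i else []) =
        (PySem.List.pyRange (max a lo) (min b hi)).flatMap g := by
  intro a b
  by_cases hba : b ≤ a
  · rw [PySem.List.pyRange_one_eq_nil hba, PySem.List.pyRange_one_eq_nil (by omega)]; simp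
  · have hab : a < b := by omega
    generalize hn : (b - a).toNat = n
    induction n generalizing a with
    | zero => omega
    | succ n ih =>
      rw [PySem.List.pyRange_one_cons hab, List.flatMap_cons]
      by_cases hlo : lo ≤ a
      · by_cases hhi : a < hi
        · rw [if_pos ⟨hlo, hhi⟩,
            show max a lo = a by omega,
            PySem.List.pyRange_one_cons (show a < min b hi by omega), List.flatMap_cons]
          congr 1
          by_cases h1 : b ≤ a + 1
          · rw [PySem.List.pyRange_one_eq_nil h1, PySem.List.pyRange_one_eq_nil (by omega),
              List.flatMap_nil, List.flatMap_nil]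
          · rw [ih (a+1) (by omega) (by omega) (by omega), show max (a+1) lo = a + 1 by omega]
        · rw [if_neg (by omega), List.nil_append,
            PySem.List.pyRange_one_eq_nil (show min b hi ≤ max a lo by omega)]
          by_cases h1 : b ≤ a + 1
          · simp [PySem.List.pyRange_one_eq_nil h1]
          · rw [ih (a+1) (by omega) (by omega) (by omega), PySem.List.pyRange_one_eq_nil (by omega), List.flatMap_nil]
      · rw [if_neg (by omega), List.nil_append, show max a lo = lo by omega]
        by_cases h1 : b ≤ a + 1
        · rw [PySem.List.pyRange_one_eq_nil h1, List.flatMap_nil,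
            PySem.List.pyRange_one_eq_nil (by omega), List.flatMap_nil]
        · rw [ih (a+1) (by omega) (by omega) (by omega), show max (a+1) lo = lo by omega]

-- the structural double loop of B, flattened, is the filtered index range [100, 320)
set_option maxRecDepth 8192 in
theorem pvK1 (s e : Int) :
    (PySem.List.enumerate "ABCDEFGHJKMNPQRTUVWXYZ".toList 0).flatMap (fun p =>
        (PySem.List.pyRange 0 10).flatMap (fun d =>
          if s ≤ 100 + p.1 * 10 + d ∧ 100 + p.1 * 10 + d ≤ e
          then [String.ofList [p.2] ++ PySem.Int.toStr d] else [])) =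
      (PySem.List.pyRange 100 320).flatMap (fun i => if s ≤ i ∧ i < e + 1 then pvHigh i else []) := by
  rw [PySem.List.enumerate_eq_map_pyRange _ 'A', List.flatMap_map,
    show PySem.List.pyRange 100 320 =
      (PySem.List.pyRange 0 (PySem.List.len "ABCDEFGHJKMNPQRTUVWXYZ".toList)).flatMap
        (fun c => (PySem.List.pyRange 0 10).map (fun d => 100 + c * 10 + d)) from by decide,
    List.flatMap_assoc]
  refine List.flatMap_congr ?_
  intro c hc
  rw [PySem.List.mem_pyRange_one] at hc
  rw [List.flatMap_map]
  refine List.flatMap_congr ?_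
  intro d hd
  rw [PySem.List.mem_pyRange_one] at hd
  have harith : (100 + c * 10 + d) - 100 = c * 10 + d := by ring
  have hfd : PySem.Int.floordiv (100 + c * 10 + d - 100) 10 = c := by
    rw [harith, PySem.Int.floordiv_eq_ediv_of_pos (by norm_num)]; omega
  have hmd : PySem.Int.mod (100 + c * 10 + d - 100) 10 = d := by
    rw [harith, PySem.Int.mod_eq_emod_of_pos (by norm_num)]; omega
  have hcond : (100 + c * 10 + d ≤ e) = (100 + c * 10 + d < e + 1) := by
    apply propext; omega
  simp only [pvHigh, hfd, hmd, hcond]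
  simp [PySem.Str.pyGet?, PySem.List.pyGetD]

theorem pvB_canon (s e : Int) :
    get_sequence_strings_alt s e =
      (PySem.List.pyRange s (min e 99 + 1)).map pvFmt02 ++
        (PySem.List.pyRange (max 100 s) (min 320 (e + 1))).flatMap pvHigh := by
  rw [pvB_split, pvK1, pvIntervalFilter]

theorem pvLowMap (a b : Int) (hb : b ≤ 100) :
    (PySem.List.pyRange a b).flatMap pvBodyA = (PySem.List.pyRange a b).map pvFmt02 := by
  rw [List.flatMap_congr (g := fun i => [pvFmt02 i]) ?_, pvFlatMapSingleton]
  intro i hi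
  rw [PySem.List.mem_pyRange_one] at hi
  simp only [pvBodyA, if_pos (show i ≤ 99 by omega)]

theorem pvMain (s e : Int) : get_sequence_strings s e = get_sequence_strings_alt s e := by
  rw [pvA_flatMap, pvB_canon]
  by_cases h : e + 1 ≤ s
  · rw [PySem.List.pyRange_one_eq_nil h,
      PySem.List.pyRange_one_eq_nil (show min e 99 + 1 ≤ s by omega),
      PySem.List.pyRange_one_eq_nil (show min 320 (e + 1) ≤ max 100 s by omega)]
    simp
  · by_cases h2 : e + 1 ≤ 100
    · rw [show min e 99 = e from by omega,
        PySem.List.pyRange_one_eq_nil (show min 320 (e + 1) ≤ max 100 s by omega),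
        pvLowMap _ _ (by omega)]
      simp
    · rw [PySem.List.pyRange_one_append s (max s 100) (e + 1) (by omega) (by omega),
        List.flatMap_append]
      congr 1
      · rw [show min e 99 + 1 = 100 from by omega]
        have hr : PySem.List.pyRange s (max s 100) = PySem.List.pyRange s 100 := by
          by_cases hs : s ≤ 100
          · rw [max_eq_right hs]
          · rw [PySem.List.pyRange_one_eq_nil (show max s 100 ≤ s by omega),
              PySem.List.pyRange_one_eq_nil (by omega)]
        rw [hr, pvLowMap _ _ (by omega)]
      · rw [List.flatMap_congr (l := PySem.List.pyRange (max s 100) (e + 1))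
            (g := fun i => if 100 ≤ i ∧ i < 320 then pvHigh i else []) ?_,
          pvIntervalFilter,
          show max (max s 100) 100 = max 100 s from by omega,
          show min (e + 1) 320 = min 320 (e + 1) from by omega]
        intro i hi
        rw [PySem.List.mem_pyRange_one] at hi
        have hdiv : PySem.Int.floordiv (i - 100) 10 = (i - 100) / 10 :=
          PySem.Int.floordiv_eq_ediv_of_pos (by norm_num)
        simp only [pvBodyA, if_neg (show ¬ i ≤ 99 by omega)]
        by_cases h3 : i < 320
        · rw [if_pos (show PySem.Int.floordiv (i - 100) 10 < 22 from by rw [hdiv]; omega),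
            if_pos ⟨by omega, h3⟩]
        · rw [if_neg (show ¬ PySem.Int.floordiv (i - 100) 10 < 22 from by rw [hdiv]; omega),
            if_neg (by omega)]

-- ===== VERDICT (by name: the statement is the Claim_ definition above) =====
theorem get_sequence_strings_spec : Claim_equal_get_sequence_strings := by
  intro s e _
  unfold Spec_get_sequence_strings
  exact pvMain s e
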